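-- pv_equiv track=rewrite | github.com/linliu1127/draw-and-win | core/win_checker.py | _is_valid_hand
-- ===== SOURCE A (Python) =====
-- def _is_valid_hand(ranks: list[int]) -> bool:
--     """Check whether 5 ranks form (one pair) + (one 3-card sequence)."""
--     if len(ranks) != 5:
--         return False
--     for i in range(5):
--         for j in range(i + 1, 5):
--             if ranks[i] == ranks[j]:
--                 remaining = [ranks[k] for k in range(5) if k != i and k != j]
--                 if _is_sequence(remaining):
--                     return True
--     return False
--
-- def _is_sequence(ranks: list[int]) -> bool:
--     """Return True if the 3 ranks are three consecutive integers."""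
--     if len(ranks) != 3:
--         return False
--     s = sorted(ranks)
--     return s[1] == s[0] + 1 and s[2] == s[1] + 1
-- ===== SOURCE B (Python) =====
-- def _is_valid_hand(ranks: list[int]) -> bool:
--     """Sort once, then scan the 4 adjacent positions for an equal pair whose
--     removal leaves a consecutive triple (already sorted, so checked directly)."""
--     if len(ranks) != 5:
--         return False
--     s = sorted(ranks)
--     for i in range(4):
--         if s[i] == s[i + 1]:
--             rest = s[:i] + s[i + 2:]
--             if rest[1] == rest[0] + 1 and rest[2] == rest[1] + 1:
--                 return True
--     return False
-- ===== Notes on version B (the rewrite author's own statement) =====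
-- stated objective: simpler
-- what changed: A enumerates all 10 index pairs and sorts each 3-card remainder; B sorts the hand once, scans the 4 adjacent positions for an equal pair (equal values are adjacent after sorting), and checks the already-sorted remainder directly with no further sort.
import Mathlib
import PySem

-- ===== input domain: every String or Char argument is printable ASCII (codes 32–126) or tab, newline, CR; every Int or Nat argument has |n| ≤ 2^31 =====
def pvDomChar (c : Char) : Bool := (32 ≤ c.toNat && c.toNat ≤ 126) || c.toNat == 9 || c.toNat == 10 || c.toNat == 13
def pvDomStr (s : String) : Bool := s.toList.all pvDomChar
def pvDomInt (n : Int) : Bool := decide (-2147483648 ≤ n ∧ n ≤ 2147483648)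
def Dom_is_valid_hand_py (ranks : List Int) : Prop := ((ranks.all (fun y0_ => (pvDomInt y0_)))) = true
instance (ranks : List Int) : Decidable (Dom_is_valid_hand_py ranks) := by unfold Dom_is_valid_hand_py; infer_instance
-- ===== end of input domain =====

-- B replaces A's scan of all 10 index pairs (each sorting its 3-card remainder)
-- by one sort of the hand and a scan of the 4 adjacent positions; objective: simpler.


-- ===== PORT A =====
def is_sequence_py (ranks : List Int) : Bool :=
  if PySem.List.len ranks ≠ 3 then false
  else
    let s := PySem.List.sorted ranks (fun x => x) false
    (PySem.List.pyGetD s 1 0 == PySem.List.pyGetD s 0 0 + 1) &&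
    (PySem.List.pyGetD s 2 0 == PySem.List.pyGetD s 1 0 + 1)

def is_valid_hand_py (ranks : List Int) : Bool :=
  if PySem.List.len ranks ≠ 5 then false
  else
    (PySem.List.pyRange 0 5 1).any (fun i =>
      (PySem.List.pyRange (i + 1) 5 1).any (fun j =>
        (PySem.List.pyGetD ranks i 0 == PySem.List.pyGetD ranks j 0) &&
        is_sequence_py (((PySem.List.pyRange 0 5 1).filter (fun k => !(k == i) && !(k == j))).map
          (fun k => PySem.List.pyGetD ranks k 0))))

-- ===== PORT B =====
def is_valid_hand_py_alt (ranks : List Int) : Bool :=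
  if PySem.List.len ranks ≠ 5 then false
  else
    let s := PySem.List.sorted ranks (fun x => x) false
    (PySem.List.pyRange 0 4 1).any (fun i =>
      (PySem.List.pyGetD s i 0 == PySem.List.pyGetD s (i + 1) 0) &&
      (let rest := PySem.List.slice s none (some i) ++ PySem.List.slice s (some (i + 2)) none
       (PySem.List.pyGetD rest 1 0 == PySem.List.pyGetD rest 0 0 + 1) &&
       (PySem.List.pyGetD rest 2 0 == PySem.List.pyGetD rest 1 0 + 1)))

-- ===== PRECONDITION & SPEC =====
def Spec_is_valid_hand_py (ranks : List Int) (out : Bool) : Prop := out = is_valid_hand_py_alt ranks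
instance (ranks : List Int) (out : Bool) : Decidable (Spec_is_valid_hand_py ranks out) := by unfold Spec_is_valid_hand_py; infer_instance

-- ===== CLAIM (what is proved, stated in full; the proofs are below) =====
def Claim_equal_is_valid_hand_py : Prop := ∀ (ranks : List Int), Dom_is_valid_hand_py ranks → Spec_is_valid_hand_py ranks (is_valid_hand_py ranks)

-- ===== LEMMAS AND PROOFS =====

-- "the hand is a pair plus a run of three": the specification both ports are shown to meet
def ValidHand (r : List Int) : Prop := ∃ v t : Int, r.Perm [v, v, t, t + 1, t + 2]

-- pulling two named elements to the front is a permutation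
theorem pvInsert2 (l1 l2 l3 : List Int) (v w : Int) :
    (l1 ++ v :: (l2 ++ w :: l3)).Perm (v :: w :: (l1 ++ (l2 ++ l3))) := by
  refine (List.perm_middle).trans (List.Perm.cons v ?_)
  have h : l1 ++ (l2 ++ w :: l3) = (l1 ++ l2) ++ w :: l3 := by rw [List.append_assoc]
  rw [h, ← List.append_assoc]
  exact List.perm_middle

theorem pvCancel2 (l1 l2 l3 : List Int) (v : Int) (m : List Int)
    (h : (l1 ++ v :: (l2 ++ v :: l3)).Perm (v :: v :: m)) : (l1 ++ (l2 ++ l3)).Perm m :=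
  (((pvInsert2 l1 l2 l3 v v).symm.trans h).cons_inv).cons_inv

-- an element counted twice splits the list around its two occurrences
theorem pvTwoSplit (l : List Int) (v : Int) (h : 2 ≤ l.count v) :
    ∃ l1 l2 l3, l = l1 ++ v :: (l2 ++ v :: l3) := by
  induction l with
  | nil => simp at h
  | cons x xs ih =>
    by_cases hx : x = v
    · subst hx
      have hm : x ∈ xs := by
        rw [← List.count_pos_iff]
        rw [List.count_cons_self] at h
        omega
      obtain ⟨s, t, rfl⟩ := List.append_of_mem hm
      exact ⟨[], s, t, by simp⟩
    · have h' : 2 ≤ xs.count v := by simpa [hx] using h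
      obtain ⟨l1, l2, l3, rfl⟩ := ih h'
      exact ⟨x :: l1, l2, l3, by simp⟩

-- a 5-list permuting to v :: v :: m carries v at two positions; the ten cases
set_option maxHeartbeats 1000000 in
theorem pvFindPair (a b c d e v : Int) (m : List Int) (h : ([a,b,c,d,e] : List Int).Perm (v :: v :: m)) :
    (a = v ∧ b = v ∧ ([c,d,e] : List Int).Perm m) ∨ (a = v ∧ c = v ∧ ([b,d,e] : List Int).Perm m) ∨
    (a = v ∧ d = v ∧ ([b,c,e] : List Int).Perm m) ∨ (a = v ∧ e = v ∧ ([b,c,d] : List Int).Perm m) ∨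
    (b = v ∧ c = v ∧ ([a,d,e] : List Int).Perm m) ∨ (b = v ∧ d = v ∧ ([a,c,e] : List Int).Perm m) ∨
    (b = v ∧ e = v ∧ ([a,c,d] : List Int).Perm m) ∨ (c = v ∧ d = v ∧ ([a,b,e] : List Int).Perm m) ∨
    (c = v ∧ e = v ∧ ([a,b,d] : List Int).Perm m) ∨ (d = v ∧ e = v ∧ ([a,b,c] : List Int).Perm m) := by
  have hc : 2 ≤ List.count v [a,b,c,d,e] := by
    rw [h.count_eq]
    simp
  obtain ⟨l1, l2, l3, heq⟩ := pvTwoSplit _ v hc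
  rcases l1 with _ | ⟨p1, _ | ⟨q1, _ | ⟨r1, _ | ⟨s1, l1⟩⟩⟩⟩ <;>
    rcases l2 with _ | ⟨p2, _ | ⟨q2, _ | ⟨r2, _ | ⟨s2, l2⟩⟩⟩⟩ <;>
      simp only [List.cons_append, List.nil_append, List.cons.injEq] at heq
  · obtain ⟨h1, h2, rfl⟩ := heq
    rw [h1, h2] at h
    exact Or.inl ⟨h1, h2, pvCancel2 [] [] _ v m h⟩
  · obtain ⟨h1, rfl, h2, rfl⟩ := heq
    rw [h1, h2] at h
    exact Or.inr (Or.inl ⟨h1, h2, pvCancel2 [] [b] _ v m h⟩)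
  · obtain ⟨h1, rfl, rfl, h2, rfl⟩ := heq
    rw [h1, h2] at h
    exact Or.inr (Or.inr (Or.inl ⟨h1, h2, pvCancel2 [] [b,c] _ v m h⟩))
  · obtain ⟨h1, rfl, rfl, rfl, h2, rfl⟩ := heq
    rw [h1, h2] at h
    exact Or.inr (Or.inr (Or.inr (Or.inl ⟨h1, h2, pvCancel2 [] [b,c,d] _ v m h⟩)))
  · exfalso; obtain ⟨-, -, -, -, -, hbad⟩ := heq
    have hl := congrArg List.length hbad
    simp only [List.length_append, List.length_cons, List.length_nil] at hl; omega
  · obtain ⟨rfl, h1, h2, rfl⟩ := heq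
    rw [h1, h2] at h
    exact Or.inr (Or.inr (Or.inr (Or.inr (Or.inl ⟨h1, h2, pvCancel2 [a] [] _ v m h⟩))))
  · obtain ⟨rfl, h1, rfl, h2, rfl⟩ := heq
    rw [h1, h2] at h
    exact Or.inr (Or.inr (Or.inr (Or.inr (Or.inr (Or.inl ⟨h1, h2, pvCancel2 [a] [c] _ v m h⟩)))))
  · obtain ⟨rfl, h1, rfl, rfl, h2, rfl⟩ := heq
    rw [h1, h2] at h
    exact Or.inr (Or.inr (Or.inr (Or.inr (Or.inr (Or.inr (Or.inl ⟨h1, h2, pvCancel2 [a] [c,d] _ v m h⟩))))))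
  · exfalso; obtain ⟨-, -, -, -, -, hbad⟩ := heq
    have hl := congrArg List.length hbad
    simp only [List.length_append, List.length_cons, List.length_nil] at hl; omega
  · exfalso; obtain ⟨-, -, -, -, -, hbad⟩ := heq
    have hl := congrArg List.length hbad
    simp only [List.length_append, List.length_cons, List.length_nil] at hl; omega
  · obtain ⟨rfl, rfl, h1, h2, rfl⟩ := heq
    rw [h1, h2] at h
    exact Or.inr (Or.inr (Or.inr (Or.inr (Or.inr (Or.inr (Or.inr (Or.inl ⟨h1, h2, pvCancel2 [a,b] [] _ v m h⟩)))))))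
  · obtain ⟨rfl, rfl, h1, rfl, h2, rfl⟩ := heq
    rw [h1, h2] at h
    exact Or.inr (Or.inr (Or.inr (Or.inr (Or.inr (Or.inr (Or.inr (Or.inr (Or.inl ⟨h1, h2, pvCancel2 [a,b] [d] _ v m h⟩))))))))
  · exfalso; obtain ⟨-, -, -, -, -, hbad⟩ := heq
    have hl := congrArg List.length hbad
    simp only [List.length_append, List.length_cons, List.length_nil] at hl; omega
  · exfalso; obtain ⟨-, -, -, -, -, hbad⟩ := heq
    have hl := congrArg List.length hbad
    simp only [List.length_append, List.length_cons, List.length_nil] at hl; omega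
  · exfalso; obtain ⟨-, -, -, -, -, hbad⟩ := heq
    have hl := congrArg List.length hbad
    simp only [List.length_append, List.length_cons, List.length_nil] at hl; omega
  · obtain ⟨rfl, rfl, rfl, h1, h2, rfl⟩ := heq
    rw [h1, h2] at h
    exact Or.inr (Or.inr (Or.inr (Or.inr (Or.inr (Or.inr (Or.inr (Or.inr (Or.inr ⟨h1, h2, pvCancel2 [a,b,c] [] _ v m h⟩))))))))
  · exfalso; obtain ⟨-, -, -, -, -, hbad⟩ := heq
    have hl := congrArg List.length hbad
    simp only [List.length_append, List.length_cons, List.length_nil] at hl; omega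
  · exfalso; obtain ⟨-, -, -, -, -, hbad⟩ := heq
    have hl := congrArg List.length hbad
    simp only [List.length_append, List.length_cons, List.length_nil] at hl; omega
  · exfalso; obtain ⟨-, -, -, -, -, hbad⟩ := heq
    have hl := congrArg List.length hbad
    simp only [List.length_append, List.length_cons, List.length_nil] at hl; omega
  · exfalso; obtain ⟨-, -, -, -, -, hbad⟩ := heq
    have hl := congrArg List.length hbad
    simp only [List.length_append, List.length_cons, List.length_nil] at hl; omega
  · exfalso; obtain ⟨-, -, -, -, hbad⟩ := heq
    have hl := congrArg List.length hbad
    simp only [List.length_append, List.length_cons, List.length_nil] at hl; omega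
  · exfalso; obtain ⟨-, -, -, -, hbad⟩ := heq
    have hl := congrArg List.length hbad
    simp only [List.length_append, List.length_cons, List.length_nil] at hl; omega
  · exfalso; obtain ⟨-, -, -, -, hbad⟩ := heq
    have hl := congrArg List.length hbad
    simp only [List.length_append, List.length_cons, List.length_nil] at hl; omega
  · exfalso; obtain ⟨-, -, -, -, hbad⟩ := heq
    have hl := congrArg List.length hbad
    simp only [List.length_append, List.length_cons, List.length_nil] at hl; omega
  · exfalso; obtain ⟨-, -, -, -, hbad⟩ := heq
    have hl := congrArg List.length hbad
    simp only [List.length_append, List.length_cons, List.length_nil] at hl; omega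

-- a ≤-sorted triple permuting to [t, t+1, t+2] is that list
theorem pvSorted3 (x y z t : Int) (hxy : x ≤ y) (hyz : y ≤ z)
    (h : ([x,y,z] : List Int).Perm [t, t+1, t+2]) : x = t ∧ y = t + 1 ∧ z = t + 2 := by
  have h1 : t ∈ ([x,y,z] : List Int) := h.mem_iff.mpr (by simp)
  have h2 : t + 1 ∈ ([x,y,z] : List Int) := h.mem_iff.mpr (by simp)
  have h3 : t + 2 ∈ ([x,y,z] : List Int) := h.mem_iff.mpr (by simp)
  simp at h1 h2 h3
  rcases h1 with h1|h1|h1 <;> rcases h2 with h2|h2|h2 <;> rcases h3 with h3|h3|h3 <;> omega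

theorem pvSeqIff (l : List Int) : is_sequence_py l = true ↔ ∃ t : Int, l.Perm [t, t+1, t+2] := by
  by_cases hl : l.length = 3
  · obtain ⟨x, y, z, hs⟩ : ∃ x y z : Int, PySem.List.sorted l (fun u => u) false = [x, y, z] := by
      have h3 : (PySem.List.sorted l (fun u => u) false).length = 3 := by
        rw [PySem.List.length_sorted, hl]
      match hm : PySem.List.sorted l (fun u => u) false, h3 with
      | [x, y, z], _ => exact ⟨x, y, z, rfl⟩
    have hperm : l.Perm [x, y, z] := (hs ▸ PySem.List.sorted_perm l (fun u => u) false).symm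
    have hpw := PySem.List.sorted_pairwise l (fun u => u)
    rw [hs] at hpw
    simp [List.pairwise_cons] at hpw
    obtain ⟨⟨hxy, hxz⟩, hyz⟩ := hpw
    rw [is_sequence_py]
    simp only [PySem.List.len_eq, hl, hs]
    have g0 : ∀ p q w : Int, PySem.List.pyGetD [p,q,w] 0 0 = p := fun _ _ _ => rfl
    have g1 : ∀ p q w : Int, PySem.List.pyGetD [p,q,w] 1 0 = q := fun _ _ _ => rfl
    have g2 : ∀ p q w : Int, PySem.List.pyGetD [p,q,w] 2 0 = w := fun _ _ _ => rfl
    constructor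
    · intro hcond
      simp [g0, g1, g2] at hcond
      obtain ⟨h1, h2⟩ := hcond
      have hlz : ([x, y, z] : List Int) = [x, x + 1, x + 2] := by simp [h1, h2]; omega
      exact ⟨x, hlz ▸ hperm⟩
    · rintro ⟨t, ht⟩
      have := pvSorted3 x y z t hxy hyz (hperm.symm.trans ht)
      obtain ⟨rfl, h1, h2⟩ := this
      simp [g0, g1, g2, h1, h2]; omega
  · rw [is_sequence_py]
    have hl' : (PySem.List.len l : Int) ≠ 3 := by simp [PySem.List.len_eq]; exact_mod_cast hl
    simp only [hl', if_pos, ne_eq, not_false_iff]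
    constructor
    · intro hf; exact absurd hf (by simp)
    · rintro ⟨t, ht⟩
      exact absurd (ht.length_eq) (by simp [hl])

set_option maxHeartbeats 2000000 in
theorem pvAUnfold (a b c d e : Int) : is_valid_hand_py [a,b,c,d,e] = true ↔
    ((a = b ∧ is_sequence_py [c,d,e] = true) ∨ (a = c ∧ is_sequence_py [b,d,e] = true) ∨
     (a = d ∧ is_sequence_py [b,c,e] = true) ∨ (a = e ∧ is_sequence_py [b,c,d] = true) ∨
     (b = c ∧ is_sequence_py [a,d,e] = true) ∨ (b = d ∧ is_sequence_py [a,c,e] = true) ∨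
     (b = e ∧ is_sequence_py [a,c,d] = true) ∨ (c = d ∧ is_sequence_py [a,b,e] = true) ∨
     (c = e ∧ is_sequence_py [a,b,d] = true) ∨ (d = e ∧ is_sequence_py [a,b,c] = true)) := by
  rw [is_valid_hand_py, if_neg (by norm_num [PySem.List.len_eq])]
  have hr : PySem.List.pyRange 0 5 1 = [0,1,2,3,4] := by decide
  have hI0 : PySem.List.pyRange (0+1) 5 1 = [1,2,3,4] := by decide
  have hI1 : PySem.List.pyRange (1+1) 5 1 = [2,3,4] := by decide
  have hI2 : PySem.List.pyRange (2+1) 5 1 = [3,4] := by decide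
  have hI3 : PySem.List.pyRange (3+1) 5 1 = [4] := by decide
  have hI4 : PySem.List.pyRange (4+1) 5 1 = [] := by decide
  have hF01 : List.filter (fun k => !(k == (0:Int)) && !(k == 1)) [0,1,2,3,4] = [2,3,4] := by decide
  have hF02 : List.filter (fun k => !(k == (0:Int)) && !(k == 2)) [0,1,2,3,4] = [1,3,4] := by decide
  have hF03 : List.filter (fun k => !(k == (0:Int)) && !(k == 3)) [0,1,2,3,4] = [1,2,4] := by decide
  have hF04 : List.filter (fun k => !(k == (0:Int)) && !(k == 4)) [0,1,2,3,4] = [1,2,3] := by decide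
  have hF12 : List.filter (fun k => !(k == (1:Int)) && !(k == 2)) [0,1,2,3,4] = [0,3,4] := by decide
  have hF13 : List.filter (fun k => !(k == (1:Int)) && !(k == 3)) [0,1,2,3,4] = [0,2,4] := by decide
  have hF14 : List.filter (fun k => !(k == (1:Int)) && !(k == 4)) [0,1,2,3,4] = [0,2,3] := by decide
  have hF23 : List.filter (fun k => !(k == (2:Int)) && !(k == 3)) [0,1,2,3,4] = [0,1,4] := by decide
  have hF24 : List.filter (fun k => !(k == (2:Int)) && !(k == 4)) [0,1,2,3,4] = [0,1,3] := by decide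
  have hF34 : List.filter (fun k => !(k == (3:Int)) && !(k == 4)) [0,1,2,3,4] = [0,1,2] := by decide
  have hg0 : PySem.List.pyGetD [a,b,c,d,e] 0 0 = a := rfl
  have hg1 : PySem.List.pyGetD [a,b,c,d,e] 1 0 = b := rfl
  have hg2 : PySem.List.pyGetD [a,b,c,d,e] 2 0 = c := rfl
  have hg3 : PySem.List.pyGetD [a,b,c,d,e] 3 0 = d := rfl
  have hg4 : PySem.List.pyGetD [a,b,c,d,e] 4 0 = e := rfl
  simp only [hr, hI0, hI1, hI2, hI3, hI4, hF01, hF02, hF03, hF04, hF12, hF13, hF14, hF23, hF24,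
    hF34, List.any_cons, List.any_nil, List.map_cons, List.map_nil, hg0, hg1, hg2, hg3, hg4,
    Bool.or_eq_true, Bool.and_eq_true, beq_iff_eq, Bool.or_false]
  simp only [or_assoc]

set_option maxHeartbeats 2000000 in
theorem pvBUnfold (r : List Int) (x0 x1 x2 x3 x4 : Int)
    (hs : PySem.List.sorted r (fun u => u) false = [x0,x1,x2,x3,x4]) (h5 : r.length = 5) :
    is_valid_hand_py_alt r = true ↔
      ((x0 = x1 ∧ x3 = x2 + 1 ∧ x4 = x3 + 1) ∨ (x1 = x2 ∧ x3 = x0 + 1 ∧ x4 = x3 + 1) ∨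
       (x2 = x3 ∧ x1 = x0 + 1 ∧ x4 = x1 + 1) ∨ (x3 = x4 ∧ x1 = x0 + 1 ∧ x2 = x1 + 1)) := by
  rw [is_valid_hand_py_alt, if_neg (by norm_num [PySem.List.len_eq, h5])]
  have hr : PySem.List.pyRange 0 4 1 = [0,1,2,3] := by decide
  have ha0 : PySem.List.slice [x0,x1,x2,x3,x4] none (some 0) = ([] : List Int) := rfl
  have ha1 : PySem.List.slice [x0,x1,x2,x3,x4] none (some 1) = [x0] := rfl
  have ha2 : PySem.List.slice [x0,x1,x2,x3,x4] none (some 2) = [x0,x1] := rfl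
  have ha3 : PySem.List.slice [x0,x1,x2,x3,x4] none (some 3) = [x0,x1,x2] := rfl
  have hb0 : PySem.List.slice [x0,x1,x2,x3,x4] (some (0+2)) none = [x2,x3,x4] := rfl
  have hb1 : PySem.List.slice [x0,x1,x2,x3,x4] (some (1+2)) none = [x3,x4] := rfl
  have hb2 : PySem.List.slice [x0,x1,x2,x3,x4] (some (2+2)) none = [x4] := rfl
  have hb3 : PySem.List.slice [x0,x1,x2,x3,x4] (some (3+2)) none = ([] : List Int) := rfl
  have k0 : PySem.List.pyGetD [x0,x1,x2,x3,x4] 0 0 = x0 := rfl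
  have k01 : PySem.List.pyGetD [x0,x1,x2,x3,x4] (0+1) 0 = x1 := rfl
  have k1 : PySem.List.pyGetD [x0,x1,x2,x3,x4] 1 0 = x1 := rfl
  have k11 : PySem.List.pyGetD [x0,x1,x2,x3,x4] (1+1) 0 = x2 := rfl
  have k2 : PySem.List.pyGetD [x0,x1,x2,x3,x4] 2 0 = x2 := rfl
  have k21 : PySem.List.pyGetD [x0,x1,x2,x3,x4] (2+1) 0 = x3 := rfl
  have k3 : PySem.List.pyGetD [x0,x1,x2,x3,x4] 3 0 = x3 := rfl
  have k31 : PySem.List.pyGetD [x0,x1,x2,x3,x4] (3+1) 0 = x4 := rfl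
  have g0 : ∀ p q w : Int, PySem.List.pyGetD [p,q,w] 0 0 = p := fun _ _ _ => rfl
  have g1 : ∀ p q w : Int, PySem.List.pyGetD [p,q,w] 1 0 = q := fun _ _ _ => rfl
  have g2 : ∀ p q w : Int, PySem.List.pyGetD [p,q,w] 2 0 = w := fun _ _ _ => rfl
  simp only [hs, hr, List.any_cons, List.any_nil, ha0, ha1, ha2, ha3, hb0, hb1, hb2, hb3,
    List.nil_append, List.cons_append, List.append_nil, k0, k01, k1, k11, k2, k21, k3, k31,
    g0, g1, g2, Bool.or_eq_true, Bool.and_eq_true, beq_iff_eq, Bool.or_false]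

theorem pvAIff (a b c d e : Int) : is_valid_hand_py [a,b,c,d,e] = true ↔ ValidHand [a,b,c,d,e] := by
  rw [pvAUnfold]
  constructor
  · rintro (⟨rfl, hq⟩ | ⟨rfl, hq⟩ | ⟨rfl, hq⟩ | ⟨rfl, hq⟩ | ⟨rfl, hq⟩ | ⟨rfl, hq⟩ | ⟨rfl, hq⟩ |
      ⟨rfl, hq⟩ | ⟨rfl, hq⟩ | ⟨rfl, hq⟩) <;> obtain ⟨t, h3⟩ := (pvSeqIff _).mp hq
    · exact ⟨_, t, (pvInsert2 [] [] [c,d,e] _ _).trans ((h3.cons _).cons _)⟩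
    · exact ⟨_, t, (pvInsert2 [] [b] [d,e] _ _).trans ((h3.cons _).cons _)⟩
    · exact ⟨_, t, (pvInsert2 [] [b,c] [e] _ _).trans ((h3.cons _).cons _)⟩
    · exact ⟨_, t, (pvInsert2 [] [b,c,d] [] _ _).trans ((h3.cons _).cons _)⟩
    · exact ⟨_, t, (pvInsert2 [a] [] [d,e] _ _).trans ((h3.cons _).cons _)⟩
    · exact ⟨_, t, (pvInsert2 [a] [c] [e] _ _).trans ((h3.cons _).cons _)⟩
    · exact ⟨_, t, (pvInsert2 [a] [c,d] [] _ _).trans ((h3.cons _).cons _)⟩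
    · exact ⟨_, t, (pvInsert2 [a,b] [] [e] _ _).trans ((h3.cons _).cons _)⟩
    · exact ⟨_, t, (pvInsert2 [a,b] [d] [] _ _).trans ((h3.cons _).cons _)⟩
    · exact ⟨_, t, (pvInsert2 [a,b,c] [] [] _ _).trans ((h3.cons _).cons _)⟩
  · rintro ⟨v, t, hvt⟩
    rcases pvFindPair a b c d e v _ hvt with ⟨h1,h2,m0⟩|⟨h1,h2,m0⟩|⟨h1,h2,m0⟩|⟨h1,h2,m0⟩|
      ⟨h1,h2,m0⟩|⟨h1,h2,m0⟩|⟨h1,h2,m0⟩|⟨h1,h2,m0⟩|⟨h1,h2,m0⟩|⟨h1,h2,m0⟩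
    · exact Or.inl ⟨h1.trans h2.symm, (pvSeqIff _).mpr ⟨t, m0⟩⟩
    · exact Or.inr (Or.inl ⟨h1.trans h2.symm, (pvSeqIff _).mpr ⟨t, m0⟩⟩)
    · exact Or.inr (Or.inr (Or.inl ⟨h1.trans h2.symm, (pvSeqIff _).mpr ⟨t, m0⟩⟩))
    · exact Or.inr (Or.inr (Or.inr (Or.inl ⟨h1.trans h2.symm, (pvSeqIff _).mpr ⟨t, m0⟩⟩)))
    · exact Or.inr (Or.inr (Or.inr (Or.inr (Or.inl ⟨h1.trans h2.symm, (pvSeqIff _).mpr ⟨t, m0⟩⟩))))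
    · exact Or.inr (Or.inr (Or.inr (Or.inr (Or.inr (Or.inl ⟨h1.trans h2.symm, (pvSeqIff _).mpr ⟨t, m0⟩⟩)))))
    · exact Or.inr (Or.inr (Or.inr (Or.inr (Or.inr (Or.inr (Or.inl ⟨h1.trans h2.symm, (pvSeqIff _).mpr ⟨t, m0⟩⟩))))))
    · exact Or.inr (Or.inr (Or.inr (Or.inr (Or.inr (Or.inr (Or.inr (Or.inl ⟨h1.trans h2.symm, (pvSeqIff _).mpr ⟨t, m0⟩⟩)))))))
    · exact Or.inr (Or.inr (Or.inr (Or.inr (Or.inr (Or.inr (Or.inr (Or.inr (Or.inl ⟨h1.trans h2.symm, (pvSeqIff _).mpr ⟨t, m0⟩⟩))))))))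
    · exact Or.inr (Or.inr (Or.inr (Or.inr (Or.inr (Or.inr (Or.inr (Or.inr (Or.inr ⟨h1.trans h2.symm, (pvSeqIff _).mpr ⟨t, m0⟩⟩))))))))

theorem pvBIff (r : List Int) (h5 : r.length = 5) : is_valid_hand_py_alt r = true ↔ ValidHand r := by
  obtain ⟨x0, x1, x2, x3, x4, hs⟩ :
      ∃ x0 x1 x2 x3 x4 : Int, PySem.List.sorted r (fun u => u) false = [x0,x1,x2,x3,x4] := by
    have h5' : (PySem.List.sorted r (fun u => u) false).length = 5 := by
      rw [PySem.List.length_sorted, h5]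
    match hm : PySem.List.sorted r (fun u => u) false, h5' with
    | [x0, x1, x2, x3, x4], _ => exact ⟨x0, x1, x2, x3, x4, rfl⟩
  have hperm : r.Perm [x0,x1,x2,x3,x4] := (hs ▸ PySem.List.sorted_perm r (fun u => u) false).symm
  have hpw := PySem.List.sorted_pairwise r (fun u => u)
  rw [hs] at hpw
  simp [List.pairwise_cons] at hpw
  obtain ⟨⟨h01, h02, h03, h04⟩, ⟨h12, h13, h14⟩, ⟨h23, h24⟩, h34⟩ := hpw
  rw [pvBUnfold r x0 x1 x2 x3 x4 hs h5]
  constructor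
  · rintro (⟨hp, hr1, hr2⟩ | ⟨hp, hr1, hr2⟩ | ⟨hp, hr1, hr2⟩ | ⟨hp, hr1, hr2⟩)
    · refine ⟨x0, x2, hperm.trans ((pvInsert2 [] [] [x2,x3,x4] x0 x1).trans ?_)⟩
      have he : (x0 :: x1 :: ([] ++ ([] ++ [x2,x3,x4])) : List Int) = [x0,x0,x2,x2+1,x2+2] := by
        simp only [List.nil_append, List.cons.injEq, true_and, and_true]; omega
      rw [he]
    · refine ⟨x1, x0, hperm.trans ((pvInsert2 [x0] [] [x3,x4] x1 x2).trans ?_)⟩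
      have he : (x1 :: x2 :: ([x0] ++ ([] ++ [x3,x4])) : List Int) = [x1,x1,x0,x0+1,x0+2] := by
        simp only [List.cons_append, List.nil_append, List.cons.injEq, true_and, and_true]; omega
      rw [he]
    · refine ⟨x2, x0, hperm.trans ((pvInsert2 [x0,x1] [] [x4] x2 x3).trans ?_)⟩
      have he : (x2 :: x3 :: ([x0,x1] ++ ([] ++ [x4])) : List Int) = [x2,x2,x0,x0+1,x0+2] := by
        simp only [List.cons_append, List.nil_append, List.cons.injEq, true_and, and_true]; omega
      rw [he]
    · refine ⟨x3, x0, hperm.trans ((pvInsert2 [x0,x1,x2] [] [] x3 x4).trans ?_)⟩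
      have he : (x3 :: x4 :: ([x0,x1,x2] ++ ([] ++ [])) : List Int) = [x3,x3,x0,x0+1,x0+2] := by
        simp only [List.cons_append, List.nil_append, List.append_nil, List.cons.injEq, true_and, and_true]; omega
      rw [he]
  · rintro ⟨v, t, hvt⟩
    have hp : ([x0,x1,x2,x3,x4] : List Int).Perm (v :: v :: [t,t+1,t+2]) :=
      hperm.symm.trans hvt
    rcases pvFindPair x0 x1 x2 x3 x4 v _ hp with ⟨h1,h2,m0⟩|⟨h1,h2,m0⟩|⟨h1,h2,m0⟩|⟨h1,h2,m0⟩|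
      ⟨h1,h2,m0⟩|⟨h1,h2,m0⟩|⟨h1,h2,m0⟩|⟨h1,h2,m0⟩|⟨h1,h2,m0⟩|⟨h1,h2,m0⟩ <;>
    · have h3 := fun hxy hyz => pvSorted3 _ _ _ t hxy hyz m0
      have h4 := h3 (by omega) (by omega)
      omega

-- ===== VERDICT (by name: the statement is the Claim_ definition above) =====
theorem is_valid_hand_py_spec : Claim_equal_is_valid_hand_py := by
  intro ranks _
  unfold Spec_is_valid_hand_py
  by_cases h5 : ranks.length = 5
  · obtain ⟨a, b, c, d, e, rfl⟩ : ∃ a b c d e : Int, ranks = [a,b,c,d,e] := by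
      match ranks, h5 with
      | [a,b,c,d,e], _ => exact ⟨a,b,c,d,e, rfl⟩
    have hA := pvAIff a b c d e
    have hB := pvBIff [a,b,c,d,e] h5
    cases hA' : is_valid_hand_py [a,b,c,d,e] <;> cases hB' : is_valid_hand_py_alt [a,b,c,d,e] <;>
      simp_all
  · have h5' : (ranks.length : Int) ≠ 5 := by exact_mod_cast h5
    simp [is_valid_hand_py, is_valid_hand_py_alt, PySem.List.len_eq, h5']
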